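-- pv_equiv track=rewrite | github.com/DiamondLightSource/python-dlstbx | src/dlstbx/health_checks/filesystem.py | _print_history
-- ===== SOURCE A (Python) =====
-- import itertools
--
-- _success = "✓"
--
-- _failure = "✘"
--
-- def _grouper(iterable, n, fillvalue=None):
--     "Collect data into non-overlapping fixed-length chunks or blocks"
--     # grouper('ABCDEFG', 3, 'x') --> ABC DEF Gxx
--     # taken from https://docs.python.org/3/library/itertools.html
--     args = [iter(iterable)] * n
--     return itertools.zip_longest(*args, fillvalue=fillvalue)
--
-- def _print_history(history: list[bool], success: bool, message: str) -> str:
--     history.append(not success)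
--     historychars = (_failure if result else _success for result in history)
--     if message:
--         message += "\n"
--     return (
--         f"{message}Test history timeline (from oldest to most recent):\n"
--         + "\n".join("".join(char) for char in _grouper(historychars, 60, fillvalue=""))
--     )
-- ===== SOURCE B (Python) =====
-- _success = "\u2713"
-- _failure = "\u2718"
--
-- def _print_history(history, success, message):
--     history.append(not success)
--     chars = "".join(_failure if result else _success for result in history)
--     if message:
--         message += "\n"
--     lines = [chars[i:i + 60] for i in range(0, len(chars), 60)]
--     return (
--         f"{message}Test history timeline (from oldest to most recent):\n"
--         + "\n".join(lines)
--     )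
-- ===== Notes on version B (the rewrite author's own statement) =====
-- stated objective: simpler
-- what changed: Replaces the itertools.zip_longest _grouper recipe (tuples of single-char strings joined per tuple) with one joined character string chunked into 60-char lines by index slicing.
import Mathlib
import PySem

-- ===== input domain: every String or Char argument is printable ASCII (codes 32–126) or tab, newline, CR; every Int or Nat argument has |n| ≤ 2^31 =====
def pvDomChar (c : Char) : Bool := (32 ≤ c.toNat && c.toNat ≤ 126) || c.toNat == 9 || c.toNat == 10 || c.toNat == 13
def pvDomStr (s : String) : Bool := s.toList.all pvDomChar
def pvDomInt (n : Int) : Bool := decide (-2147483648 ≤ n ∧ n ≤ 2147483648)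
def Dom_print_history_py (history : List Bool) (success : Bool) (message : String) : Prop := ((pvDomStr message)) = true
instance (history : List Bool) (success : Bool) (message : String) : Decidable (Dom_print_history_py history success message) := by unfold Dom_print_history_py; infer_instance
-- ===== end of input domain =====

-- B replaces the itertools zip_longest grouper with one joined char string chunked by slicing (objective: simpler).
-- Python A mutates `history` in place (history.append(not success)); B performs the same mutation;
-- the equivalence proved here is about the RETURN value.

-- ===== PORT A =====
-- _grouper(historychars, 60, fillvalue="") followed by "".join per tuple: each tuple consumes
-- the next (up to) 60 items of the shared iterator, the fill "" vanishing in the join — i.e. it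
-- yields the successive 60-blocks of the sequence, joined; transcribed as this recursion.
def pvGrouperJoin60 (strs : List String) : List String :=
  if strs = [] then []
  else PySem.Str.join "" (strs.take 60) :: pvGrouperJoin60 (strs.drop 60)
termination_by strs.length
decreasing_by
  rename_i h
  have : strs.length ≠ 0 := fun hl => h (List.eq_nil_of_length_eq_zero hl)
  simp [List.length_drop]; omega

def print_history_py (history : List Bool) (success : Bool) (message : String) : String :=
  let history := history ++ [!success]
  let historychars : List String := history.map (fun result => if result then "✘" else "✓")
  let message := if message ≠ "" then message ++ "\n" else message
  message ++ "Test history timeline (from oldest to most recent):\n"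
    ++ PySem.Str.join "\n" (pvGrouperJoin60 historychars)

-- ===== PORT B =====
def print_history_py_alt (history : List Bool) (success : Bool) (message : String) : String :=
  let history := history ++ [!success]
  let chars : String := PySem.Str.join "" (history.map (fun result => if result then "✘" else "✓"))
  let message := if message ≠ "" then message ++ "\n" else message
  let lines : List String :=
    (PySem.List.pyRange 0 (PySem.Str.len chars) 60).map
      (fun i => PySem.Str.slice chars (some i) (some (i + 60)))
  message ++ "Test history timeline (from oldest to most recent):\n"
    ++ PySem.Str.join "\n" lines

-- ===== PRECONDITION & SPEC =====
def Spec_print_history_py (history : List Bool) (success : Bool) (message : String) (out : String) : Prop := out = print_history_py_alt history success message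
instance (history : List Bool) (success : Bool) (message : String) (out : String) : Decidable (Spec_print_history_py history success message out) := by unfold Spec_print_history_py; infer_instance

-- ===== CLAIM (what is proved, stated in full; the proofs are below) =====
def Claim_equal_print_history_py : Prop := ∀ (history : List Bool) (success : Bool) (message : String), Dom_print_history_py history success message → Spec_print_history_py history success message (print_history_py history success message)

-- ===== LEMMAS AND PROOFS =====

-- The grouper recursion yields exactly the 60-blocks, indexed by k < ⌈len/60⌉.
theorem pvGrouperJoin60_eq_blocks (c : Nat) (strs : List String)
    (hc : c = (strs.length + 59) / 60) :
    (List.range c).map (fun k => PySem.Str.join "" ((strs.drop (60 * k)).take 60))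
      = pvGrouperJoin60 strs := by
  induction c generalizing strs with
  | zero =>
    have hnil : strs = [] := by
      cases strs with
      | nil => rfl
      | cons a t => simp at hc; omega
    subst hnil
    rw [pvGrouperJoin60]; simp
  | succ m ih =>
    have hne : strs ≠ [] := by
      intro h; subst h; simp at hc
    rw [pvGrouperJoin60, if_neg hne]
    rw [List.range_succ_eq_map]
    simp only [List.map_cons, List.map_map]
    congr 1
    rw [← ih (strs.drop 60) (by
      have h1 : strs.length ≠ 0 := fun hl => hne (List.eq_nil_of_length_eq_zero hl)
      simp only [List.length_drop]
      omega)]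
    apply List.map_congr_left
    intro k _
    simp only [Function.comp]
    have : 60 * Nat.succ k = 60 + 60 * k := by omega
    rw [this, ← List.drop_drop]

-- range(0, n, 60) is the 60-multiples below n, indexed by k < ⌈n/60⌉.
theorem pvPyRange60 (n : Nat) :
    PySem.List.pyRange 0 (n : Int) 60
      = (List.range ((n + 59) / 60)).map (fun k => ((60 * k : Nat) : Int)) := by
  rw [PySem.List.pyRange_of_pos 0 (n : Int) (by norm_num)]
  congr 1
  · funext k; push_cast; ring
  · congr 1
    by_cases h : 0 < n
    · rw [if_pos (by exact_mod_cast h)]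
      have : ((n : Int) - 0 + 60 - 1) = ((n + 59 : Nat) : Int) := by push_cast; ring
      rw [this]
      rw [show (60 : Int) = ((60 : Nat) : Int) from rfl, ← Int.natCast_div, Int.toNat_natCast]
    · have hn : n = 0 := by omega
      subst hn
      simp

-- The joined char string of the singleton strings is the char list itself.
theorem pvJoinSingletons (history : List Bool) :
    (PySem.Str.join "" (history.map (fun result => if result then "✘" else "✓"))).toList
      = history.map (fun result => if result then '✘' else '✓') := by
  rw [PySem.Str.toList_join]
  have : (history.map (fun result => if result then "✘" else "✓")).map String.toList
      = (history.map (fun result => if result then '✘' else '✓')).map (fun c => [c]) := by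
    simp only [List.map_map, List.map_inj_left]
    intro r _
    cases r <;> rfl
  rw [this]
  exact PySem.Chars.join_nil_singletons _

-- Each slice chars[60k : 60k+60] is the join of the corresponding block of singleton strings.
theorem pvSliceBlock (history : List Bool) (k : Nat) :
    PySem.Str.slice (PySem.Str.join "" (history.map (fun result => if result then "✘" else "✓")))
        (some ((60 * k : Nat) : Int)) (some (((60 * k : Nat) : Int) + 60))
      = PySem.Str.join "" (((history.map (fun result => if result then "✘" else "✓")).drop (60 * k)).take 60) := by
  rw [← String.toList_inj]
  rw [PySem.Str.toList_slice, PySem.Chars.slice_eq_listSlice]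
  rw [pvJoinSingletons]
  rw [show (((60 * k : Nat) : Int) + 60) = (((60 * k : Nat) : Int) + ((60 : Nat) : Int)) from by push_cast; ring]
  rw [PySem.List.slice_natCast_add]
  rw [PySem.Str.toList_join]
  have : (((history.map (fun result => if result then "✘" else "✓")).drop (60 * k)).take 60).map String.toList
      = ((((history.map (fun result => if result then '✘' else '✓')).drop (60 * k)).take 60)).map (fun c => [c]) := by
    simp only [← List.map_drop, ← List.map_take, List.map_map]
    apply List.map_congr_left
    intro r _
    cases r <;> rfl
  rw [this, show ("" : String).toList = [] from rfl, PySem.Chars.join_nil_singletons]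

-- ===== VERDICT (by name: the statement is the Claim_ definition above) =====
theorem print_history_py_spec : Claim_equal_print_history_py := by
  intro history success message _
  unfold Spec_print_history_py print_history_py print_history_py_alt
  dsimp only
  have hlen : PySem.Str.len (PySem.Str.join ""
      ((history ++ [!success]).map (fun result => if result then "✘" else "✓")))
      = ((((history ++ [!success]).map (fun result => if result then "✘" else "✓")).length : Nat) : Int) := by
    simp only [PySem.Str.len_eq, pvJoinSingletons, List.length_map]
  rw [hlen, pvPyRange60, List.map_map]
  have hmap : (List.range ((((history ++ [!success]).map (fun result => if result then "✘" else "✓")).length + 59) / 60)).map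
        ((fun i => PySem.Str.slice (PySem.Str.join "" ((history ++ [!success]).map (fun result => if result then "✘" else "✓"))) (some i) (some (i + 60))) ∘ (fun k => ((60 * k : Nat) : Int)))
      = (List.range ((((history ++ [!success]).map (fun result => if result then "✘" else "✓")).length + 59) / 60)).map
        (fun k => PySem.Str.join "" ((((history ++ [!success]).map (fun result => if result then "✘" else "✓")).drop (60 * k)).take 60)) := by
    apply List.map_congr_left
    intro k _
    exact pvSliceBlock (history ++ [!success]) k
  rw [hmap, pvGrouperJoin60_eq_blocks _ _ rfl]
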